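-- pv_equiv track=rewrite | github.com/yje9802/Algorithms | 프로그래머스/2/42626. 더 맵게/더 맵게.py | solution
-- ===== SOURCE A (Python) =====
-- import heapq
--
-- def solution(scoville, K):
--     answer = 0
--
--     heapq.heapify(scoville)
--
--     while scoville:
--         first = heapq.heappop(scoville)
--         if first >= K:
--             break
--         if len(scoville) == 0 and first < K:
--             answer = -1
--             break
--         second = heapq.heappop(scoville)
--         mixed = first + (second * 2)
--         heapq.heappush(scoville, mixed)
--         answer += 1
--
--     return answer
-- ===== SOURCE B (Python) =====
-- def _insert_sorted(xs, v):
--     out = []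
--     i = 0
--     while i < len(xs) and xs[i] < v:
--         out.append(xs[i])
--         i += 1
--     return out + [v] + xs[i:]
--
-- def solution(scoville, K):
--     xs = sorted(scoville)
--     answer = 0
--     while xs and xs[0] < K:
--         if len(xs) == 1:
--             return -1
--         xs = _insert_sorted(xs[2:], xs[0] + 2 * xs[1])
--         answer += 1
--     return answer
-- ===== Notes on version B (the rewrite author's own statement) =====
-- stated objective: simpler
-- what changed: Replaces A's heapq binary-heap priority queue with one initial sort followed by ordered linear reinsertion of each mixed value into a plain sorted list (and B does not mutate the scoville argument, while A heapifies/pops it in place).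
import Mathlib
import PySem

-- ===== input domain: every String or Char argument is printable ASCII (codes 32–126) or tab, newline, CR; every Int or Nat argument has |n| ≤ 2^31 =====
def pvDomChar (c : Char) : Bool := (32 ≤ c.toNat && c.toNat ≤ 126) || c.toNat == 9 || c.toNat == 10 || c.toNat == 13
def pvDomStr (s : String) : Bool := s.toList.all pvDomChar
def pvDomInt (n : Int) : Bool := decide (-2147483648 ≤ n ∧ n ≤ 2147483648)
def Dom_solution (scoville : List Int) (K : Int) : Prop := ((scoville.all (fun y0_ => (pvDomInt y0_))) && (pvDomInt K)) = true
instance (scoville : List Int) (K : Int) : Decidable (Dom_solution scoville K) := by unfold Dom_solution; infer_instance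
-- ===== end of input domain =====

-- Equivalent return values: A's heapq priority queue replaced in B by one initial sort plus
-- ordered linear reinsertion (objective: simpler). A mutates its scoville argument in place
-- (heapified, popped); B does not — the equivalence proved here is about the RETURN value only.


-- ===== PORT A =====
-- heapq's library calls are ported by their contract on the multiset held by the list:
-- heapify rearranges in place (identity on the multiset), heappop removes and returns the
-- minimum element, heappush adds an element; the loop itself is A's code branch for branch.

-- helper fact cited by solutionLoopA's decreasing_by: popping the minimum shortens the list by one
theorem length_erase_min (heap : List Int) (hne : heap ≠ []) :
    (heap.erase ((PySem.List.min? heap (fun x => x)).getD 0)).length + 1 = heap.length := by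
  obtain ⟨m, hmeq⟩ : ∃ m, PySem.List.min? heap (fun x => x) = some m := by
    rcases h : PySem.List.min? heap (fun x => x) with _ | m
    · exact absurd ((PySem.List.min?_eq_none_iff heap _).mp h) hne
    · exact ⟨m, rfl⟩
  have hmem : (PySem.List.min? heap (fun x => x)).getD 0 ∈ heap := by
    rw [hmeq]; exact PySem.List.min?_mem hmeq
  have hle := List.length_erase_of_mem hmem
  have hl : 0 < heap.length := List.length_pos_iff.mpr hne
  omega

def solutionLoopA (heap : List Int) (K : Int) (answer : Int) : Int :=
  if hne : heap = [] then answer             -- while scoville: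
  else
    -- first = heapq.heappop(scoville): the minimum value, removed from the list
    if hK : (PySem.List.min? heap (fun x => x)).getD 0 ≥ K then answer   -- if first >= K: break
    else if hz : (heap.erase ((PySem.List.min? heap (fun x => x)).getD 0)).length = 0
                 ∧ (PySem.List.min? heap (fun x => x)).getD 0 < K then -1   -- if len(scoville) == 0 and first < K
    else
      -- second = heapq.heappop(scoville); mixed = first + (second * 2); heappush(mixed); answer += 1
      solutionLoopA
        ((heap.erase ((PySem.List.min? heap (fun x => x)).getD 0)).erase
            ((PySem.List.min? (heap.erase ((PySem.List.min? heap (fun x => x)).getD 0)) (fun x => x)).getD 0)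
          ++ [(PySem.List.min? heap (fun x => x)).getD 0
              + ((PySem.List.min? (heap.erase ((PySem.List.min? heap (fun x => x)).getD 0)) (fun x => x)).getD 0) * 2])
        K (answer + 1)
  termination_by heap.length
  decreasing_by
    have h1 := length_erase_min heap hne
    have hne1 : heap.erase ((PySem.List.min? heap (fun x => x)).getD 0) ≠ [] := by
      intro hh
      exact hz ⟨by simp [hh], lt_of_not_ge hK⟩
    have h2 := length_erase_min _ hne1
    simp only [List.length_append, List.length_cons, List.length_nil]
    omega

def solution (scoville : List Int) (K : Int) : Int :=
  -- answer = 0; heapq.heapify(scoville) (in-place rearrangement: identity on the multiset)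
  solutionLoopA scoville K 0

-- ===== PORT B =====
def insertSorted (xs : List Int) (v : Int) : List Int :=
  match xs with
  | [] => [v]
  | x :: rest => if x < v then x :: insertSorted rest v else v :: x :: rest

theorem length_insertSorted (xs : List Int) (v : Int) :
    (insertSorted xs v).length = xs.length + 1 := by
  induction xs with
  | nil => rfl
  | cons x rest ih => by_cases h : x < v <;> simp [insertSorted, h, ih]

def altLoop (xs : List Int) (K : Int) (answer : Int) : Int :=
  match xs with
  | [] => answer                             -- while xs
  | x :: rest =>
      if x < K then                          -- and xs[0] < K
        match rest with
        | [] => -1                           -- if len(xs) == 1: return -1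
        | y :: rest2 => altLoop (insertSorted rest2 (x + 2 * y)) K (answer + 1)
      else answer
  termination_by xs.length
  decreasing_by simp [length_insertSorted]

def solution_alt (scoville : List Int) (K : Int) : Int :=
  altLoop (PySem.List.sorted scoville (fun x => x)) K 0

-- ===== PRECONDITION & SPEC =====
def Spec_solution (scoville : List Int) (K : Int) (out : Int) : Prop := out = solution_alt scoville K
instance (scoville : List Int) (K : Int) (out : Int) : Decidable (Spec_solution scoville K out) := by unfold Spec_solution; infer_instance

-- ===== CLAIM (what is proved, stated in full; the proofs are below) =====
def Claim_equal_solution : Prop := ∀ (scoville : List Int) (K : Int), Dom_solution scoville K → Spec_solution scoville K (solution scoville K)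

-- ===== LEMMAS AND PROOFS =====

theorem insertSorted_perm (xs : List Int) (v : Int) :
    (insertSorted xs v).Perm (v :: xs) := by
  induction xs with
  | nil => exact List.Perm.refl _
  | cons x rest ih =>
      by_cases h : x < v
      · simpa [insertSorted, h] using ((ih.cons x).trans (List.Perm.swap v x rest))
      · simp [insertSorted, h]

theorem mem_insertSorted {xs : List Int} {v y : Int} :
    y ∈ insertSorted xs v ↔ y = v ∨ y ∈ xs := by
  rw [(insertSorted_perm xs v).mem_iff]; simp

theorem insertSorted_sorted {xs : List Int} (v : Int)
    (h : xs.Pairwise (· ≤ ·)) : (insertSorted xs v).Pairwise (· ≤ ·) := by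
  induction xs with
  | nil => simp [insertSorted]
  | cons x rest ih =>
      rcases List.pairwise_cons.mp h with ⟨hx, hrest⟩
      by_cases hxv : x < v
      · simp only [insertSorted, if_pos hxv]
        refine List.pairwise_cons.mpr ⟨?_, ih hrest⟩
        intro y hy
        rcases mem_insertSorted.mp hy with rfl | hy
        · exact le_of_lt hxv
        · exact hx y hy
      · simp only [insertSorted, if_neg hxv]
        refine List.pairwise_cons.mpr ⟨?_, h⟩
        intro y hy
        rcases List.mem_cons.mp hy with rfl | hy
        · exact le_of_not_gt hxv
        · exact le_trans (le_of_not_gt hxv) (hx y hy)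

-- min? of a nonempty list whose sorted form starts with x returns the value x
theorem min?_eq_head_sorted {heap : List Int} {x : Int} {rest : List Int}
    (hs : PySem.List.sorted heap (fun z => z) = x :: rest) :
    PySem.List.min? heap (fun z => z) = some x := by
  have hne : heap ≠ [] := by
    intro h; subst h
    rw [(PySem.List.sorted_eq_nil_iff [] (fun z : Int => z) false).mpr rfl] at hs
    exact absurd hs (by simp)
  rcases h : PySem.List.min? heap (fun z => z) with _ | m
  · exact absurd ((PySem.List.min?_eq_none_iff heap _).mp h) hne
  · have hmmem : m ∈ heap := PySem.List.min?_mem h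
    have hmin : ∀ y ∈ heap, m ≤ y := PySem.List.min?_isMin h
    have hxle : ∀ y ∈ heap, x ≤ y := PySem.List.key_head_sorted_le heap (fun z => z) hs
    have hxmem : x ∈ heap := by
      have hx : x ∈ PySem.List.sorted heap (fun z : Int => z) := by rw [hs]; simp
      exact (PySem.List.mem_sorted heap (fun z : Int => z) false x).mp hx
    have : m = x := le_antisymm (hmin x hxmem) (hxle m hmmem)
    rw [this]

-- core loop correspondence: A's min-extraction loop on the multiset equals B's loop on the sorted list
theorem loop_eq : ∀ (n : Nat) (heap : List Int), heap.length ≤ n → ∀ (K answer : Int),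
    solutionLoopA heap K answer = altLoop (PySem.List.sorted heap (fun x => x)) K answer := by
  intro n
  induction n with
  | zero =>
      intro heap hlen K answer
      have h0 : heap = [] := List.length_eq_zero_iff.mp (Nat.le_zero.mp hlen)
      subst h0
      rw [solutionLoopA, (PySem.List.sorted_eq_nil_iff [] (fun z : Int => z) false).mpr rfl]
      simp [altLoop]
  | succ n ih =>
      intro heap hlen K answer
      by_cases hne : heap = []
      · subst hne
        rw [solutionLoopA, (PySem.List.sorted_eq_nil_iff [] (fun z : Int => z) false).mpr rfl]
        simp [altLoop]
      · rcases hs : PySem.List.sorted heap (fun x => x) with _ | ⟨x, rest⟩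
        · exact absurd ((PySem.List.sorted_eq_nil_iff heap _ false).mp hs) hne
        have hperm : heap.Perm (x :: rest) := (hs ▸ PySem.List.sorted_perm heap (fun x => x) false).symm
        have hmin : PySem.List.min? heap (fun z => z) = some x := min?_eq_head_sorted hs
        have hpair : (x :: rest).Pairwise (fun a b : Int => a ≤ b) := by
          have hp := PySem.List.sorted_pairwise heap (fun z : Int => z)
          rw [hs] at hp; exact hp
        have herase1 : (heap.erase x).Perm rest := by
          have hp := hperm.erase x
          simpa using hp
        rw [solutionLoopA]
        simp only [hne, dite_false, hmin, Option.getD_some]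
        by_cases hK : x ≥ K
        · rw [dif_pos hK]
          conv_rhs => rw [altLoop.eq_def]
          simp [not_lt.mpr hK]
        · have hxK : x < K := lt_of_not_ge hK
          rw [dif_neg hK]
          rcases rest with _ | ⟨y, rest2⟩
          · -- single element left: A returns -1, B returns -1
            have hlen0 : (heap.erase x).length = 0 := by
              simpa using herase1.length_eq
            rw [dif_pos ⟨hlen0, hxK⟩]
            conv_rhs => rw [altLoop.eq_def]
            simp [hxK]
          · have hlen0 : ¬ ((heap.erase x).length = 0 ∧ x < K) := by
              rintro ⟨h0, -⟩
              have he := herase1.length_eq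
              simp [h0] at he
            rw [dif_neg hlen0]
            have hsort1 : PySem.List.sorted (heap.erase x) (fun z => z) = y :: rest2 :=
              PySem.List.sorted_id_eq_of_perm_of_pairwise (heap.erase x) (y :: rest2)
                herase1.symm (List.pairwise_cons.mp hpair).2
            have hmin2 : PySem.List.min? (heap.erase x) (fun z => z) = some y :=
              min?_eq_head_sorted hsort1
            simp only [hmin2, Option.getD_some]
            have herase2 : ((heap.erase x).erase y).Perm rest2 := by
              have hp := (hperm.erase x).erase y
              simpa using hp
            have hlen2 : (((heap.erase x).erase y) ++ [x + y * 2]).length ≤ n := by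
              have e2 := herase2.length_eq
              have e1 := hperm.length_eq
              simp at e1 ⊢
              omega
            rw [ih _ hlen2]
            have hrest2pair : rest2.Pairwise (fun a b : Int => a ≤ b) :=
              (List.pairwise_cons.mp (List.pairwise_cons.mp hpair).2).2
            have hfinal : PySem.List.sorted (((heap.erase x).erase y) ++ [x + y * 2]) (fun z => z)
                = insertSorted rest2 (x + 2 * y) := by
              apply PySem.List.sorted_id_eq_of_perm_of_pairwise
              · have h1 : (insertSorted rest2 (x + 2 * y)).Perm ((x + 2 * y) :: rest2) :=
                  insertSorted_perm rest2 (x + 2 * y)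
                have h2 : ((x + 2 * y) :: rest2).Perm (rest2 ++ [x + 2 * y]) :=
                  (List.perm_append_singleton _ _).symm
                have h3 : (rest2 ++ [x + 2 * y]).Perm (((heap.erase x).erase y) ++ [x + y * 2]) := by
                  have hxy : x + 2 * y = x + y * 2 := by ring
                  rw [hxy]
                  exact herase2.symm.append_right _
                exact (h1.trans h2).trans h3
              · exact insertSorted_sorted _ hrest2pair
            rw [hfinal]
            conv_rhs => rw [altLoop.eq_def]
            simp [hxK]

-- ===== VERDICT (by name: the statement is the Claim_ definition above) =====
theorem solution_spec : Claim_equal_solution := by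
  intro scoville K _
  unfold Spec_solution solution solution_alt
  exact loop_eq scoville.length scoville le_rfl K 0
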